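-- pv_equiv track=rewrite | github.com/betagouv/zam | repondeur/zam_repondeur/fetch/senat/amendements.py | _merge_badly_split_chunks
-- ===== SOURCE A (Python) =====
-- from typing import Dict, Iterable, List, Optional, Tuple
--
-- def _merge_badly_split_chunks(chunks: Iterable[str]) -> Iterable[str]:
--     chunks = iter(chunks)
--     for chunk in chunks:
--         while chunk.startswith("<body>") and not chunk.rstrip().endswith("</body>"):
--             try:
--                 chunk += " " + next(chunks)
--             except StopIteration:
--                 break
--         yield chunk
-- ===== SOURCE B (Python) =====
-- def _merge_badly_split_chunks(chunks):
--     buffer = None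
--     for chunk in chunks:
--         if buffer is not None:
--             buffer += " " + chunk
--             if buffer.rstrip().endswith("</body>"):
--                 yield buffer
--                 buffer = None
--         elif chunk.startswith("<body>") and not chunk.rstrip().endswith("</body>"):
--             buffer = chunk
--         else:
--             yield chunk
--     if buffer is not None:
--         yield buffer
-- ===== Notes on version B (the rewrite author's own statement) =====
-- stated objective: simpler
-- what changed: Replaced A's nested while/next() inner loop that pulls extra chunks out of the iterator with a single flat pass carrying an explicit buffer (None or the open <body> fragment), flushing any leftover buffer at end of input.
import Mathlib
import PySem

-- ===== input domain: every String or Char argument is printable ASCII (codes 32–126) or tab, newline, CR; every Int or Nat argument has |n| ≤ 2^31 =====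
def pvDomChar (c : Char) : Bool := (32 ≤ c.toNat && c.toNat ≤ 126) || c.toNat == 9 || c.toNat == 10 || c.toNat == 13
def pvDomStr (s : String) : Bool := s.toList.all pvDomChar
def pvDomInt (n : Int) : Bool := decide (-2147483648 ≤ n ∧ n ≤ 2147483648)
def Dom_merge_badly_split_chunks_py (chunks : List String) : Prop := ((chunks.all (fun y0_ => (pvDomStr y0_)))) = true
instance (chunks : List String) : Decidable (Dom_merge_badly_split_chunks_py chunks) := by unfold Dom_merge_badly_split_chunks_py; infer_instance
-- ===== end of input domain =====

-- B replaces A's nested while/next() merge loop by a single flat pass with an explicit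
-- buffer state (objective: simpler decomposition; same asymptotic cost).

-- ===== PORT A =====
-- the inner 'while chunk.startswith("<body>") and not chunk.rstrip().endswith("</body>"): chunk += " " + next(chunks)'
-- loop; StopIteration ('break') is the [] case
def pvAbsorb (chunk : String) (rest : List String) : String × List String :=
  if PySem.Str.startswith chunk "<body>" &&
      !(PySem.Str.endswith (PySem.Str.rstrip chunk) "</body>") then
    match rest with
    | [] => (chunk, [])
    | x :: xs => pvAbsorb (chunk ++ " " ++ x) xs
  else (chunk, rest)
termination_by rest.length
decreasing_by simp

theorem pvAbsorb_length (rest : List String) : ∀ c, (pvAbsorb c rest).2.length ≤ rest.length := by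
  induction rest with
  | nil => intro c; unfold pvAbsorb; split <;> simp
  | cons x xs ih =>
    intro c
    unfold pvAbsorb
    split
    · exact le_trans (ih _) (by simp)
    · simp

def merge_badly_split_chunks_py : List String → List String
  | [] => []
  | c :: rest =>
    let p := pvAbsorb c rest
    p.1 :: merge_badly_split_chunks_py p.2
termination_by chunks => chunks.length
decreasing_by exact Nat.lt_succ_of_le (pvAbsorb_length _ _)

-- ===== PORT B =====
def pvClosed (s : String) : Bool := PySem.Str.endswith (PySem.Str.rstrip s) "</body>"

def pvFlat : Option String → List String → List String
  | none, [] => []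
  | some b, [] => [b]
  | some b, c :: rest =>
      let b' := b ++ " " ++ c
      if pvClosed b' then b' :: pvFlat none rest else pvFlat (some b') rest
  | none, c :: rest =>
      if PySem.Str.startswith c "<body>" && !pvClosed c then pvFlat (some c) rest
      else c :: pvFlat none rest

def merge_badly_split_chunks_py_alt (chunks : List String) : List String := pvFlat none chunks

-- ===== PRECONDITION & SPEC =====
def Spec_merge_badly_split_chunks_py (chunks : List String) (out : List String) : Prop := out = merge_badly_split_chunks_py_alt chunks
instance (chunks : List String) (out : List String) : Decidable (Spec_merge_badly_split_chunks_py chunks out) := by unfold Spec_merge_badly_split_chunks_py; infer_instance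

-- ===== CLAIM (what is proved, stated in full; the proofs are below) =====
def Claim_equal_merge_badly_split_chunks_py : Prop := ∀ (chunks : List String), Dom_merge_badly_split_chunks_py chunks → Spec_merge_badly_split_chunks_py chunks (merge_badly_split_chunks_py chunks)

-- ===== LEMMAS AND PROOFS =====

theorem pv_start_append (b s : String)
    (h : PySem.Str.startswith b "<body>" = true) :
    PySem.Str.startswith (b ++ s) "<body>" = true := by
  simp only [PySem.Str.startswith_eq] at *
  rw [PySem.Chars.startswith_iff] at *
  simpa using h.trans (List.prefix_append _ _)

/-- The buffered phase: A's absorb loop followed by the outer loop equals B's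
    `some b` state, assuming the outer-loop equivalence for shorter suffixes. -/
theorem pv_absorb_flat (rest : List String) : ∀ b,
    PySem.Str.startswith b "<body>" = true → pvClosed b = false →
    (∀ l : List String, l.length ≤ rest.length →
        merge_badly_split_chunks_py l = pvFlat none l) →
    (pvAbsorb b rest).1 :: merge_badly_split_chunks_py (pvAbsorb b rest).2
      = pvFlat (some b) rest := by
  induction rest with
  | nil =>
    intro b hs hc _
    unfold pvAbsorb
    simp [pvClosed] at hs hc
    simp [hs, hc, merge_badly_split_chunks_py, pvFlat]
  | cons x xs ih =>
    intro b hs hc hmerge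
    unfold pvAbsorb
    have hcond : (PySem.Str.startswith b "<body>" &&
        !(PySem.Str.endswith (PySem.Str.rstrip b) "</body>")) = true := by
      simp only [Bool.and_eq_true, Bool.not_eq_true']
      exact ⟨hs, by simpa [pvClosed] using hc⟩
    rw [if_pos hcond]
    show (pvAbsorb (b ++ " " ++ x) xs).1 ::
        merge_badly_split_chunks_py (pvAbsorb (b ++ " " ++ x) xs).2 = pvFlat (some b) (x :: xs)
    by_cases hcl : pvClosed (b ++ " " ++ x) = true
    · -- buffer closes: absorb stops, B yields the buffer
      have : (pvAbsorb (b ++ " " ++ x) xs) = (b ++ " " ++ x, xs) := by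
        unfold pvAbsorb
        have hcl2 := hcl
        simp only [pvClosed] at hcl2
        simp at hcl2
        simp [hcl2]
      rw [this]
      simp only [pvFlat, hcl, if_pos]
      have := hmerge xs (by simp)
      simp [this]
    · -- still open: keep absorbing / keep buffering
      have hs' : PySem.Str.startswith (b ++ " " ++ x) "<body>" = true := by
        have := pv_start_append b " " hs
        simpa [String.append_assoc] using pv_start_append (b ++ " ") x this
      have hcl' : pvClosed (b ++ " " ++ x) = false := by
        simpa using hcl
      have := ih (b ++ " " ++ x) hs' hcl'
        (fun l hl => hmerge l (le_trans hl (by simp)))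
      simp only [pvFlat, hcl', if_neg, Bool.false_eq_true, not_false_iff]
      exact this

theorem pv_merge_flat (n : Nat) : ∀ chunks : List String, chunks.length ≤ n →
    merge_badly_split_chunks_py chunks = pvFlat none chunks := by
  induction n with
  | zero =>
    intro chunks h
    have : chunks = [] := by cases chunks <;> simp_all
    subst this
    simp [merge_badly_split_chunks_py, pvFlat]
  | succ n ih =>
    intro chunks h
    cases chunks with
    | nil => simp [merge_badly_split_chunks_py, pvFlat]
    | cons c rest =>
      simp only [List.length_cons, Nat.succ_le_succ_iff] at h
      unfold merge_badly_split_chunks_py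
      by_cases hcond : (PySem.Str.startswith c "<body>" && !pvClosed c) = true
      · have hs : PySem.Str.startswith c "<body>" = true := by
          simp at hcond; exact hcond.1
        have hc : pvClosed c = false := by
          simp at hcond; simpa using hcond.2
        have := pv_absorb_flat rest c hs hc (fun l hl => ih l (le_trans hl h))
        simp only [pvFlat, hcond, if_pos]
        exact this
      · have : pvAbsorb c rest = (c, rest) := by
          unfold pvAbsorb
          rw [if_neg]
          simpa [pvClosed] using hcond
        simp only [this]
        have := ih rest h
        simp only [pvFlat, hcond, if_neg, Bool.false_eq_true, not_false_iff]
        simp [this]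

-- ===== VERDICT (by name: the statement is the Claim_ definition above) =====
theorem merge_badly_split_chunks_py_spec : Claim_equal_merge_badly_split_chunks_py := by
  intro chunks _
  unfold Spec_merge_badly_split_chunks_py merge_badly_split_chunks_py_alt
  exact pv_merge_flat chunks.length chunks le_rfl
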